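-- pv_equiv track=rewrite | github.com/mikadosoftware/todoinator | todoinator/todoinator.py | linenumber_creator
-- ===== SOURCE A (Python) =====
-- def linenumber_creator(txt):
--     """
--     >>> txt = '''This
--     ... is
--     ... a
--     ... file'''
--     >>> linenumber_creator(txt)
--     [0, 4, 7, 9]
--
--     >>> linenumber_creator('')
--     []
--
--     """
--     linenumbers = []
--     for idx, val in enumerate(txt):
--         if val == "\n":
--             linenumbers.append(idx)
--     if linenumbers and linenumbers[0] != 0:
--         linenumbers.insert(0, 0)
--     return linenumbers
-- ===== SOURCE B (Python) =====
-- def linenumber_creator(txt):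
--     parts = txt.split('\n')
--     linenumbers = []
--     offset = 0
--     for part in parts[:-1]:
--         linenumbers.append(offset + len(part))
--         offset += len(part) + 1
--     if linenumbers and linenumbers[0] != 0:
--         linenumbers.insert(0, 0)
--     return linenumbers
-- ===== Notes on version B (the rewrite author's own statement) =====
-- stated objective: faster
-- what changed: B derives newline positions from the lengths of the segments produced by txt.split(' ') with a running offset, instead of A's per-character enumerate scan.
import Mathlib
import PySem

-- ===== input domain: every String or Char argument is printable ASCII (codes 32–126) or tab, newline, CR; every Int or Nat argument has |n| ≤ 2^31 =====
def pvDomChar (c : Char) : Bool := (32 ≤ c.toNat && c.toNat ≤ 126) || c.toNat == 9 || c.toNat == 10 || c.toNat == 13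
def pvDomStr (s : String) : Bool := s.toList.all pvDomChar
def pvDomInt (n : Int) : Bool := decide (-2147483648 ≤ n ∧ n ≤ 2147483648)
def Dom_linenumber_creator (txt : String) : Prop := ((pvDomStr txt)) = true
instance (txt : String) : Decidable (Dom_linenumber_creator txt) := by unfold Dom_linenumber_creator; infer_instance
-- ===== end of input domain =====

-- B replaces A's per-character enumerate scan by splitting on '\n' and accumulating
-- segment lengths into a running offset (objective: faster by a constant factor in Python).

-- ===== PORT A =====
def linenumber_creator (txt : String) : List Int :=
  let linenumbers := (PySem.List.enumerate txt.toList).foldl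
    (fun acc p => if p.2 = '\n' then acc ++ [p.1] else acc) []
  match linenumbers with
  | [] => []
  | x :: xs => if x ≠ 0 then 0 :: x :: xs else x :: xs

-- ===== PORT B =====
-- the 'for part in parts[:-1]' loop of Source B, carrying the running offset
def pvBLoop : List (List Char) → Int → List Int
  | [], _ => []
  | p :: rest, off => (off + p.length) :: pvBLoop rest (off + p.length + 1)

def linenumber_creator_alt (txt : String) : List Int :=
  let parts := PySem.Chars.splitOn txt.toList ['\n']
  let linenumbers := pvBLoop parts.dropLast 0
  match linenumbers with
  | [] => []
  | x :: xs => if x ≠ 0 then 0 :: x :: xs else x :: xs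

-- ===== PRECONDITION & SPEC =====
def Spec_linenumber_creator (txt : String) (out : List Int) : Prop := out = linenumber_creator_alt txt
instance (txt : String) (out : List Int) : Decidable (Spec_linenumber_creator txt out) := by unfold Spec_linenumber_creator; infer_instance

-- ===== CLAIM (what is proved, stated in full; the proofs are below) =====
def Claim_equal_linenumber_creator : Prop := ∀ (txt : String), Dom_linenumber_creator txt → Spec_linenumber_creator txt (linenumber_creator txt)

-- ===== LEMMAS AND PROOFS =====

/-- reference: indices of '\n' in `l`, counting from `i`. -/
def pvNl : List Char → Int → List Int
  | [], _ => []
  | c :: r, i => if c = '\n' then i :: pvNl r (i + 1) else pvNl r (i + 1)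

/-- pure structural version of `PySem.Chars.splitOn.go ['\n']`. -/
def pvSgo : List Char → List Char → List (List Char)
  | cur, [] => [cur.reverse]
  | cur, c :: rest => if c = '\n' then cur.reverse :: pvSgo [] rest else pvSgo (c :: cur) rest

theorem pvSgo_ne_nil (cur l : List Char) : pvSgo cur l ≠ [] := by
  induction l generalizing cur with
  | nil => simp [pvSgo]
  | cons c rest ih =>
      simp only [pvSgo]
      split
      · simp
      · exact ih _

theorem pvA_fold (l : List Char) (s : Int) (acc : List Int) :
    (PySem.List.enumerate l s).foldl
      (fun acc p => if p.2 = '\n' then acc ++ [p.1] else acc) acc = acc ++ pvNl l s := by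
  induction l generalizing s acc with
  | nil => simp [PySem.List.enumerate_nil, pvNl]
  | cons c r ih =>
      simp only [PySem.List.enumerate_cons, List.foldl_cons, pvNl]
      by_cases h : c = '\n' <;> simp [h, ih]

theorem pvGo_eq_sgo (l : List Char) (fuel : Nat) (cur : List Char) (acc : List (List Char))
    (h : l.length < fuel) :
    PySem.Chars.splitOn.go ['\n'] fuel l cur acc = acc.reverse ++ pvSgo cur l := by
  induction l generalizing fuel cur acc with
  | nil =>
      cases fuel with
      | zero => omega
      | succ f => rw [PySem.Chars.splitOn.go.eq_def]; simp [pvSgo]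
  | cons c rest ih =>
      cases fuel with
      | zero => omega
      | succ f =>
        rw [PySem.Chars.splitOn.go.eq_def]
        simp only [pvSgo]
        by_cases hc : c = '\n'
        · subst hc
          have hp : ['\n'].isPrefixOf ('\n' :: rest) = true := by simp [List.isPrefixOf]
          simp only [hp, if_true, List.length_cons, List.drop_succ_cons, List.length_nil, List.drop_zero]
          rw [ih f [] (cur.reverse :: acc) (by simpa using Nat.lt_of_succ_lt_succ h)]
          simp
        · have hp : ['\n'].isPrefixOf (c :: rest) = false := by
            simp [List.isPrefixOf, Ne.symm hc]
          simp only [hp, Bool.false_eq_true, if_false, if_neg hc]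
          exact ih f (c :: cur) acc (by simpa using Nat.lt_of_succ_lt_succ h)

theorem pvBLoop_sgo (l cur : List Char) (off : Int) :
    pvBLoop (pvSgo cur l).dropLast off = pvNl l (off + cur.length) := by
  induction l generalizing cur off with
  | nil => simp [pvSgo, pvBLoop, pvNl]
  | cons c rest ih =>
      simp only [pvSgo, pvNl]
      by_cases hc : c = '\n'
      · simp only [hc, if_true]
        rw [List.dropLast_cons_of_ne_nil (pvSgo_ne_nil [] rest)]
        simp only [pvBLoop, List.length_reverse]
        have := ih [] (off + cur.length + 1)
        simp only [List.length_nil, Int.natCast_zero, add_zero] at this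
        rw [this]
      · simp only [if_neg hc]
        have := ih (c :: cur) off
        simp only [List.length_cons] at this
        rw [this]
        push_cast
        ring_nf

-- ===== VERDICT (by name: the statement is the Claim_ definition above) =====
theorem linenumber_creator_spec : Claim_equal_linenumber_creator := by
  intro txt _
  show linenumber_creator txt = linenumber_creator_alt txt
  unfold linenumber_creator linenumber_creator_alt PySem.Chars.splitOn
  rw [pvA_fold txt.toList 0 []]
  rw [pvGo_eq_sgo txt.toList (txt.toList.length + 1) [] [] (by omega)]
  have := pvBLoop_sgo txt.toList [] 0
  simp only [List.length_nil, Int.natCast_zero, add_zero, List.reverse_nil,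
    List.nil_append] at this ⊢
  rw [this]
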